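-- pv_equiv track=rewrite | github.com/Jeremy-Vidaurri/aoc_24 | 2024/8/solution.py | find_possible_antinodes_2
-- ===== SOURCE A (Python) =====
-- def find_possible_antinodes_2(size, locs):
--     possible_locs = set()
--
--     for row1, col1 in locs:
--         for row2, col2 in locs:
--             if row1 == row2 and col1 == col2:
--                 continue
--             slope_row = row2-row1
--             slope_col = col2-col1
--
--             curRow = row1
--             curCol = col1
--             while (curRow - slope_row >= 0 and curRow - slope_row < size) and (curCol - slope_col >= 0 and curCol - slope_col < size):
--                 possible_locs.add((curRow-slope_row, curCol-slope_col))
--                 curRow -= slope_row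
--                 curCol -= slope_col
--             curRow = row2
--             curCol = col2
--             while (curRow + slope_row >= 0 and curRow + slope_row < size) and (curCol + slope_col >= 0 and curCol + slope_col < size):
--                 possible_locs.add((curRow+slope_row, curCol+slope_col))
--                 curRow += slope_row
--                 curCol += slope_col
--
--     return possible_locs
-- ===== SOURCE B (Python) =====
-- def find_possible_antinodes_2(size, locs):
--     # Clip the whole line p1 + t*d against the grid box by integer interval
--     # intersection (Liang-Barsky style), then emit the two clipped t-ranges;
--     # duplicates are removed once at the end instead of per insertion.
--     def axis(a, b):
--         # b != 0: the integer interval of t with 0 <= a + t*b < size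
--         if b > 0:
--             return (-(a // b), (size - 1 - a) // b)
--         return (-((size - 1 - a) // -b), a // -b)
--
--     def interval(r, c, dr, dc):
--         # (dr, dc) != (0, 0): t-interval with (r + t*dr, c + t*dc) in the grid
--         if dr == 0:
--             return axis(c, dc) if 0 <= r < size else (1, 0)
--         if dc == 0:
--             return axis(r, dr) if 0 <= c < size else (1, 0)
--         l1, h1 = axis(r, dr)
--         l2, h2 = axis(c, dc)
--         return (max(l1, l2), min(h1, h2))
--
--     emitted = []
--     for r1, c1 in locs:
--         for r2, c2 in locs:
--             if r1 == r2 and c1 == c2: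
--                 continue
--             dr, dc = r2 - r1, c2 - c1
--             lo, hi = interval(r1, c1, dr, dc)
--             if lo <= -1 <= hi:
--                 emitted.extend((r1 + t * dr, c1 + t * dc) for t in range(-1, lo - 1, -1))
--             if lo <= 2 <= hi:
--                 emitted.extend((r1 + t * dr, c1 + t * dc) for t in range(2, hi + 1))
--     return set(emitted)
-- ===== Notes on version B (the rewrite author's own statement) =====
-- stated objective: alternative
-- what changed: Instead of A's two step-by-step boundary-checking walks per antenna pair, B clips the whole line p1 + t*d against the grid box by intersecting per-axis integer t-intervals (Liang-Barsky style) and emits the two clipped t-ranges directly, collecting everything into a flat list deduplicated once at the end rather than into an incrementally-maintained set.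
import Mathlib
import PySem

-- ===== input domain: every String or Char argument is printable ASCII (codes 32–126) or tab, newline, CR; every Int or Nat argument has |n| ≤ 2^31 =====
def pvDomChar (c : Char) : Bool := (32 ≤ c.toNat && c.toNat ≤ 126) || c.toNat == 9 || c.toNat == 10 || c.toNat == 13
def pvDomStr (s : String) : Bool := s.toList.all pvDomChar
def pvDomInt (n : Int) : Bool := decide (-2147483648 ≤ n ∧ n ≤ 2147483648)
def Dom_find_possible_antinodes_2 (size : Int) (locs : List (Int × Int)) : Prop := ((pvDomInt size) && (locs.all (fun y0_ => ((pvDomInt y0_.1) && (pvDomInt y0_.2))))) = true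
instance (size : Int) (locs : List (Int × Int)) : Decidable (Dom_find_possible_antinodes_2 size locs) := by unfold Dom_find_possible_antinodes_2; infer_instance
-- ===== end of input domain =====

-- B clips each pair's whole line against the grid by integer interval intersection and
-- emits the two clipped t-ranges into a flat list deduplicated once at the end,
-- instead of A's two step-by-step boundary-checking walks into an incremental set
-- (objective: alternative; same asymptotic cost).

-- ===== PORT A =====
-- Python's while-loops walk at most `size` steps (each visited point is inside the
-- grid and a nonzero slope coordinate takes distinct values in [0,size)), so a fuel
-- of size.toNat + 1 makes the recursion total without changing the computation.
def pvWalkBack (size sr sc : Int) : Nat → Int → Int → List (Int × Int) → List (Int × Int)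
  | 0, _, _, acc => acc
  | fuel+1, r, c, acc =>
    if 0 ≤ r - sr ∧ r - sr < size ∧ 0 ≤ c - sc ∧ c - sc < size then
      pvWalkBack size sr sc fuel (r - sr) (c - sc) (PySem.Set.add acc (r - sr, c - sc))
    else acc

def pvWalkFwd (size sr sc : Int) : Nat → Int → Int → List (Int × Int) → List (Int × Int)
  | 0, _, _, acc => acc
  | fuel+1, r, c, acc =>
    if 0 ≤ r + sr ∧ r + sr < size ∧ 0 ≤ c + sc ∧ c + sc < size then
      pvWalkFwd size sr sc fuel (r + sr) (c + sc) (PySem.Set.add acc (r + sr, c + sc))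
    else acc

def find_possible_antinodes_2 (size : Int) (locs : List (Int × Int)) : List (Int × Int) :=
  locs.foldl (fun acc p1 =>
    locs.foldl (fun acc p2 =>
      if p1.1 = p2.1 ∧ p1.2 = p2.2 then acc
      else
        let sr := p2.1 - p1.1
        let sc := p2.2 - p1.2
        pvWalkFwd size sr sc (size.toNat + 1) p2.1 p2.2
          (pvWalkBack size sr sc (size.toNat + 1) p1.1 p1.2 acc)) acc) []

-- ===== PORT B =====
-- Source B: axis(a, b) — for b ≠ 0, the integer t-interval of 0 <= a + t*b < size
def pvAxis (size a b : Int) : Int × Int :=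
  if 0 < b then (-(PySem.Int.floordiv a b), PySem.Int.floordiv (size - 1 - a) b)
  else (-(PySem.Int.floordiv (size - 1 - a) (-b)), PySem.Int.floordiv a (-b))

-- Source B: interval(r, c, dr, dc) — for (dr,dc) ≠ (0,0), the t-interval keeping
-- (r + t*dr, c + t*dc) inside the grid (intersection of the two axis intervals)
def pvInterval (size r c dr dc : Int) : Int × Int :=
  if dr = 0 then
    if 0 ≤ r ∧ r < size then pvAxis size c dc else (1, 0)
  else if dc = 0 then
    if 0 ≤ c ∧ c < size then pvAxis size r dr else (1, 0)
  else
    let p := pvAxis size r dr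
    let q := pvAxis size c dc
    (max p.1 q.1, min p.2 q.2)

def find_possible_antinodes_2_alt (size : Int) (locs : List (Int × Int)) : List (Int × Int) :=
  PySem.Set.ofList
    (locs.foldl (fun em p1 =>
      locs.foldl (fun em p2 =>
        if p1.1 = p2.1 ∧ p1.2 = p2.2 then em
        else
          let dr := p2.1 - p1.1
          let dc := p2.2 - p1.2
          let I := pvInterval size p1.1 p1.2 dr dc
          let em := if I.1 ≤ -1 ∧ -1 ≤ I.2 then
              em ++ (PySem.List.pyRange (-1) (I.1 - 1) (-1)).map
                (fun t => (p1.1 + t * dr, p1.2 + t * dc)) else em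
          if I.1 ≤ 2 ∧ 2 ≤ I.2 then
              em ++ (PySem.List.pyRange 2 (I.2 + 1) 1).map
                (fun t => (p1.1 + t * dr, p1.2 + t * dc)) else em) em) [])

-- ===== PRECONDITION & SPEC =====
def Spec_find_possible_antinodes_2 (size : Int) (locs : List (Int × Int)) (out : List (Int × Int)) : Prop := out = find_possible_antinodes_2_alt size locs
instance (size : Int) (locs : List (Int × Int)) (out : List (Int × Int)) : Decidable (Spec_find_possible_antinodes_2 size locs out) := by unfold Spec_find_possible_antinodes_2; infer_instance

-- ===== CLAIM (what is proved, stated in full; the proofs are below) =====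
def Claim_equal_find_possible_antinodes_2 : Prop := ∀ (size : Int) (locs : List (Int × Int)), Dom_find_possible_antinodes_2 size locs → Spec_find_possible_antinodes_2 size locs (find_possible_antinodes_2 size locs)

-- ===== LEMMAS AND PROOFS =====

-- the per-ordered-pair emitted segment, in B's form (proof-only helper)
def pvSeg (size : Int) (p1 p2 : Int × Int) : List (Int × Int) :=
  if p1.1 = p2.1 ∧ p1.2 = p2.2 then []
  else
    let dr := p2.1 - p1.1
    let dc := p2.2 - p1.2
    let I := pvInterval size p1.1 p1.2 dr dc
    (if I.1 ≤ -1 ∧ -1 ≤ I.2 then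
        (PySem.List.pyRange (-1) (I.1 - 1) (-1)).map
          (fun t => (p1.1 + t * dr, p1.2 + t * dc)) else []) ++
    (if I.1 ≤ 2 ∧ 2 ≤ I.2 then
        (PySem.List.pyRange 2 (I.2 + 1) 1).map
          (fun t => (p1.1 + t * dr, p1.2 + t * dc)) else [])

theorem pvAxis_mem (size a b t : Int) (hb : b ≠ 0) :
    ((pvAxis size a b).1 ≤ t ∧ t ≤ (pvAxis size a b).2) ↔ (0 ≤ a + t * b ∧ a + t * b < size) := by
  unfold pvAxis
  by_cases hpos : 0 < b
  · rw [if_pos hpos]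
    simp only [neg_le]
    rw [PySem.Int.le_floordiv_iff_mul_le hpos, PySem.Int.le_floordiv_iff_mul_le hpos]
    constructor <;> intro h <;> constructor <;> nlinarith [h.1, h.2]
  · rw [if_neg hpos]
    have hb' : 0 < -b := by omega
    simp only [neg_le]
    rw [PySem.Int.le_floordiv_iff_mul_le hb', PySem.Int.le_floordiv_iff_mul_le hb']
    constructor <;> intro h <;> constructor <;> nlinarith [h.1, h.2]

theorem pvInterval_mem (size r c dr dc t : Int) (h : ¬(dr = 0 ∧ dc = 0)) :
    ((pvInterval size r c dr dc).1 ≤ t ∧ t ≤ (pvInterval size r c dr dc).2) ↔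
      (0 ≤ r + t * dr ∧ r + t * dr < size ∧ 0 ≤ c + t * dc ∧ c + t * dc < size) := by
  unfold pvInterval
  by_cases hdr : dr = 0
  · have hdc : dc ≠ 0 := fun h2 => h ⟨hdr, h2⟩
    subst hdr
    rw [if_pos rfl]
    by_cases hr : 0 ≤ r ∧ r < size
    · rw [if_pos hr, pvAxis_mem size c dc t hdc]
      simp only [mul_zero, add_zero]
      tauto
    · rw [if_neg hr]
      simp only [mul_zero, add_zero]
      constructor
      · intro hk; exfalso; omega
      · intro hk; exfalso; exact hr ⟨hk.1, hk.2.1⟩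
  · by_cases hdc : dc = 0
    · subst hdc
      rw [if_neg hdr, if_pos rfl]
      by_cases hc : 0 ≤ c ∧ c < size
      · rw [if_pos hc, pvAxis_mem size r dr t hdr]
        simp only [mul_zero, add_zero]
        tauto
      · rw [if_neg hc]
        simp only [mul_zero, add_zero]
        constructor
        · intro hk; exfalso; omega
        · intro hk; exfalso; exact hc ⟨hk.2.2.1, hk.2.2.2⟩
    · rw [if_neg hdr, if_neg hdc]
      simp only [max_le_iff, le_min_iff]
      rw [and_and_and_comm]
      rw [pvAxis_mem size r dr t hdr, pvAxis_mem size c dc t hdc]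
      tauto

-- two t-values both inside the interval are less than `size` apart
theorem pvInterval_width (size r c dr dc t1 t2 : Int) (h : ¬(dr = 0 ∧ dc = 0))
    (h1 : (pvInterval size r c dr dc).1 ≤ t1) (h12 : t1 ≤ t2)
    (h2 : t2 ≤ (pvInterval size r c dr dc).2) : t2 - t1 < size := by
  have m1 := (pvInterval_mem size r c dr dc t1 h).mp ⟨h1, le_trans h12 h2⟩
  have m2 := (pvInterval_mem size r c dr dc t2 h).mp ⟨le_trans h1 h12, h2⟩
  have hd : (0:Int) ≤ t2 - t1 := by omega
  rcases not_and_or.mp h with hs | hs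
  · rcases lt_or_gt_of_ne hs with hneg | hpos
    · nlinarith [m1.1, m1.2.1, m2.1, m2.2.1, mul_nonneg hd (by omega : (0:Int) ≤ -dr - 1)]
    · nlinarith [m1.1, m1.2.1, m2.1, m2.2.1, mul_nonneg hd (by omega : (0:Int) ≤ dr - 1)]
  · rcases lt_or_gt_of_ne hs with hneg | hpos
    · nlinarith [m1.2.2.1, m1.2.2.2, m2.2.2.1, m2.2.2.2, mul_nonneg hd (by omega : (0:Int) ≤ -dc - 1)]
    · nlinarith [m1.2.2.1, m1.2.2.2, m2.2.2.1, m2.2.2.2, mul_nonneg hd (by omega : (0:Int) ≤ dc - 1)]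

-- the backward walk with enough fuel visits exactly the first n in-grid steps
theorem pvWalkBack_core (size sr sc : Int) :
    ∀ (n fuel : Nat) (r c : Int) (acc : List (Int × Int)), n ≤ fuel →
    (∀ k : Nat, k < n →
      0 ≤ r - ((k : Int) + 1) * sr ∧ r - ((k : Int) + 1) * sr < size ∧
      0 ≤ c - ((k : Int) + 1) * sc ∧ c - ((k : Int) + 1) * sc < size) →
    ¬(0 ≤ r - ((n : Int) + 1) * sr ∧ r - ((n : Int) + 1) * sr < size ∧
      0 ≤ c - ((n : Int) + 1) * sc ∧ c - ((n : Int) + 1) * sc < size) →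
    pvWalkBack size sr sc fuel r c acc =
      (List.range n).foldl
        (fun a (k : Nat) => PySem.Set.add a (r - ((k : Int) + 1) * sr, c - ((k : Int) + 1) * sc)) acc := by
  intro n
  induction n with
  | zero =>
    intro fuel r c acc _ _ hstop
    simp only [Nat.cast_zero, zero_add, one_mul] at hstop
    cases fuel with
    | zero => simp [pvWalkBack]
    | succ f =>
      simp only [pvWalkBack]
      rw [if_neg (by tauto)]
      simp
  | succ n ih =>
    intro fuel r c acc hfuel hall hstop
    cases fuel with
    | zero => omega
    | succ f =>
      have h0 := hall 0 (Nat.succ_pos n)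
      simp only [Nat.cast_zero, zero_add, one_mul] at h0
      simp only [pvWalkBack]
      rw [if_pos (by tauto)]
      have hIH := ih f (r - sr) (c - sc) (PySem.Set.add acc (r - sr, c - sc)) (by omega)
        (fun k hk => by
          have := hall (k + 1) (by omega)
          push_cast at this ⊢
          constructor
          · have e : r - sr - ((k : Int) + 1) * sr = r - ((k : Int) + 1 + 1) * sr := by ring
            rw [e]; exact this.1
          constructor
          · have e : r - sr - ((k : Int) + 1) * sr = r - ((k : Int) + 1 + 1) * sr := by ring
            rw [e]; exact this.2.1
          constructor
          · have e : c - sc - ((k : Int) + 1) * sc = c - ((k : Int) + 1 + 1) * sc := by ring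
            rw [e]; exact this.2.2.1
          · have e : c - sc - ((k : Int) + 1) * sc = c - ((k : Int) + 1 + 1) * sc := by ring
            rw [e]; exact this.2.2.2)
        (by
          push_cast at hstop ⊢
          have e1 : r - sr - ((n : Int) + 1) * sr = r - ((n : Int) + 1 + 1) * sr := by ring
          have e2 : c - sc - ((n : Int) + 1) * sc = c - ((n : Int) + 1 + 1) * sc := by ring
          rw [e1, e2]; exact hstop)
      rw [hIH]
      rw [List.range_succ_eq_map, List.foldl_cons, List.foldl_map]
      congr 1
      · funext a k
        congr 2
        · push_cast; ring
        · push_cast; ring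
      · simp

theorem pvWalkFwd_eq_back (size sr sc : Int) :
    ∀ (fuel : Nat) (r c : Int) (acc : List (Int × Int)),
    pvWalkFwd size sr sc fuel r c acc = pvWalkBack size (-sr) (-sc) fuel r c acc := by
  intro fuel
  induction fuel with
  | zero => intro r c acc; simp [pvWalkFwd, pvWalkBack]
  | succ f ih =>
    intro r c acc
    simp only [pvWalkFwd, pvWalkBack, sub_neg_eq_add]
    split
    · exact ih _ _ _
    · rfl

theorem foldl_fun_congr {α β : Type} (l : List β) (f g : α → β → α) (init : α)
    (h : f = g) : l.foldl f init = l.foldl g init := by rw [h]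

-- A's backward walk = fold of Set.add over B's backward emission list
theorem pvBack_eq (size r c sr sc : Int) (acc : List (Int × Int))
    (h : ¬(sr = 0 ∧ sc = 0)) :
    pvWalkBack size sr sc (size.toNat + 1) r c acc =
      List.foldl PySem.Set.add acc
        (if (pvInterval size r c sr sc).1 ≤ -1 ∧ -1 ≤ (pvInterval size r c sr sc).2 then
          (PySem.List.pyRange (-1) ((pvInterval size r c sr sc).1 - 1) (-1)).map
            (fun t => (r + t * sr, c + t * sc)) else []) := by
  set I := pvInterval size r c sr sc with hI
  by_cases hin : I.1 ≤ -1 ∧ -1 ≤ I.2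
  · rw [if_pos hin]
    have hw := pvInterval_width size r c sr sc I.1 (-1) h le_rfl hin.1 hin.2
    have hn1 : (0:Int) ≤ -I.1 := by omega
    rw [pvWalkBack_core size sr sc (-I.1).toNat (size.toNat + 1) r c acc (by omega)
      (fun k hk => by
        have hmem := (pvInterval_mem size r c sr sc (-((k:Int)+1)) h).mp
          (by rw [← hI]; constructor <;> omega)
        have e1 : r + -((k:Int)+1) * sr = r - ((k:Int)+1) * sr := by ring
        have e2 : c + -((k:Int)+1) * sc = c - ((k:Int)+1) * sc := by ring
        rw [e1, e2] at hmem
        exact hmem)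
      (by
        intro hmem
        have e1 : r - (((-I.1).toNat : Int) + 1) * sr = r + (I.1 - 1) * sr := by
          have : ((-I.1).toNat : Int) = -I.1 := by omega
          rw [this]; ring
        have e2 : c - (((-I.1).toNat : Int) + 1) * sc = c + (I.1 - 1) * sc := by
          have : ((-I.1).toNat : Int) = -I.1 := by omega
          rw [this]; ring
        rw [e1, e2] at hmem
        have := (pvInterval_mem size r c sr sc (I.1 - 1) h).mpr hmem
        rw [← hI] at this
        omega)]
    rw [PySem.List.pyRange_neg_one, List.map_map, List.foldl_map]
    have en : (-1 - (I.1 - 1)).toNat = (-I.1).toNat := by omega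
    rw [en]
    apply foldl_fun_congr
    funext a k
    simp only [Function.comp]
    congr 2 <;> ring
  · rw [if_neg hin]
    rw [pvWalkBack_core size sr sc 0 (size.toNat + 1) r c acc (by omega)
      (fun k hk => absurd hk (by omega))
      (by
        intro hmem
        simp only [Nat.cast_zero, zero_add, one_mul] at hmem
        have e1 : r - sr = r + (-1) * sr := by ring
        have e2 : c - sc = c + (-1) * sc := by ring
        rw [e1, e2] at hmem
        exact hin ((pvInterval_mem size r c sr sc (-1) h).mpr hmem))]
    rfl

-- A's forward walk (from p2 = p1 + slope) = fold of Set.add over B's forward emission list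
theorem pvFwd_eq (size r c sr sc r2 c2 : Int) (acc : List (Int × Int))
    (h : ¬(sr = 0 ∧ sc = 0)) (hr2 : r2 = r + sr) (hc2 : c2 = c + sc) :
    pvWalkFwd size sr sc (size.toNat + 1) r2 c2 acc =
      List.foldl PySem.Set.add acc
        (if (pvInterval size r c sr sc).1 ≤ 2 ∧ 2 ≤ (pvInterval size r c sr sc).2 then
          (PySem.List.pyRange 2 ((pvInterval size r c sr sc).2 + 1) 1).map
            (fun t => (r + t * sr, c + t * sc)) else []) := by
  subst hr2 hc2
  rw [pvWalkFwd_eq_back]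
  set I := pvInterval size r c sr sc with hI
  by_cases hin : I.1 ≤ 2 ∧ 2 ≤ I.2
  · rw [if_pos hin]
    have hw := pvInterval_width size r c sr sc 2 I.2 h hin.1 hin.2 le_rfl
    have hn1 : (0:Int) ≤ I.2 - 1 := by omega
    rw [pvWalkBack_core size (-sr) (-sc) (I.2 - 1).toNat (size.toNat + 1) (r + sr) (c + sc) acc (by omega)
      (fun k hk => by
        have hmem := (pvInterval_mem size r c sr sc ((k:Int)+2) h).mp
          (by rw [← hI]; constructor <;> omega)
        have e1 : r + sr - ((k:Int)+1) * -sr = r + ((k:Int)+2) * sr := by ring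
        have e2 : c + sc - ((k:Int)+1) * -sc = c + ((k:Int)+2) * sc := by ring
        rw [e1, e2]
        exact hmem)
      (by
        intro hmem
        have e1 : r + sr - (((I.2 - 1).toNat : Int) + 1) * -sr = r + (I.2 + 1) * sr := by
          have : ((I.2 - 1).toNat : Int) = I.2 - 1 := by omega
          rw [this]; ring
        have e2 : c + sc - (((I.2 - 1).toNat : Int) + 1) * -sc = c + (I.2 + 1) * sc := by
          have : ((I.2 - 1).toNat : Int) = I.2 - 1 := by omega
          rw [this]; ring
        rw [e1, e2] at hmem
        have := (pvInterval_mem size r c sr sc (I.2 + 1) h).mpr hmem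
        rw [← hI] at this
        omega)]
    rw [PySem.List.pyRange_one, List.map_map, List.foldl_map]
    have en : (I.2 + 1 - 2).toNat = (I.2 - 1).toNat := by omega
    rw [en]
    apply foldl_fun_congr
    funext a k
    simp only [Function.comp]
    congr 2 <;> ring
  · rw [if_neg hin]
    rw [pvWalkBack_core size (-sr) (-sc) 0 (size.toNat + 1) (r + sr) (c + sc) acc (by omega)
      (fun k hk => absurd hk (by omega))
      (by
        intro hmem
        simp only [Nat.cast_zero, zero_add, one_mul] at hmem
        have e1 : r + sr - -sr = r + 2 * sr := by ring
        have e2 : c + sc - -sc = c + 2 * sc := by ring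
        rw [e1, e2] at hmem
        exact hin ((pvInterval_mem size r c sr sc 2 h).mpr hmem))]
    rfl

-- A's per-pair body = fold of Set.add over the segment
theorem pvPairA (size : Int) (p1 p2 : Int × Int) (s : List (Int × Int)) :
    (if p1.1 = p2.1 ∧ p1.2 = p2.2 then s
     else pvWalkFwd size (p2.1 - p1.1) (p2.2 - p1.2) (size.toNat + 1) p2.1 p2.2
       (pvWalkBack size (p2.1 - p1.1) (p2.2 - p1.2) (size.toNat + 1) p1.1 p1.2 s)) =
    List.foldl PySem.Set.add s (pvSeg size p1 p2) := by
  unfold pvSeg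
  by_cases he : p1.1 = p2.1 ∧ p1.2 = p2.2
  · rw [if_pos he, if_pos he]; rfl
  · rw [if_neg he, if_neg he]
    have hne : ¬(p2.1 - p1.1 = 0 ∧ p2.2 - p1.2 = 0) := by
      intro hz; exact he ⟨by omega, by omega⟩
    rw [pvBack_eq size p1.1 p1.2 (p2.1 - p1.1) (p2.2 - p1.2) s hne]
    rw [pvFwd_eq size p1.1 p1.2 (p2.1 - p1.1) (p2.2 - p1.2) p2.1 p2.2 _ hne (by ring) (by ring)]
    rw [List.foldl_append]

-- B's per-pair body = append of the segment
theorem pvPairB (size : Int) (p1 p2 : Int × Int) (e : List (Int × Int)) :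
    (if p1.1 = p2.1 ∧ p1.2 = p2.2 then e
     else
       let dr := p2.1 - p1.1
       let dc := p2.2 - p1.2
       let I := pvInterval size p1.1 p1.2 dr dc
       let em := if I.1 ≤ -1 ∧ -1 ≤ I.2 then
           e ++ (PySem.List.pyRange (-1) (I.1 - 1) (-1)).map
             (fun t => (p1.1 + t * dr, p1.2 + t * dc)) else e
       if I.1 ≤ 2 ∧ 2 ≤ I.2 then
           em ++ (PySem.List.pyRange 2 (I.2 + 1) 1).map
             (fun t => (p1.1 + t * dr, p1.2 + t * dc)) else em) =
    e ++ pvSeg size p1 p2 := by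
  unfold pvSeg
  by_cases he : p1.1 = p2.1 ∧ p1.2 = p2.2
  · rw [if_pos he, if_pos he]; simp
  · rw [if_neg he, if_neg he]
    simp only
    split_ifs <;> simp [List.append_assoc]

-- generic coupling of a raw-list fold with a set-state fold
theorem pvCouple {σ τ β : Type} (R : τ → σ) (fB : τ → β → τ) (fA : σ → β → σ)
    (h : ∀ e x, R (fB e x) = fA (R e) x) :
    ∀ (l : List β) (e : τ), R (l.foldl fB e) = l.foldl fA (R e) := by
  intro l
  induction l with
  | nil => intro e; rfl
  | cons x xs ih => intro e; rw [List.foldl_cons, List.foldl_cons, ih, h]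

-- ===== VERDICT (by name: the statement is the Claim_ definition above) =====
theorem find_possible_antinodes_2_spec : Claim_equal_find_possible_antinodes_2 := by
  intro size locs _
  unfold Spec_find_possible_antinodes_2 find_possible_antinodes_2 find_possible_antinodes_2_alt
  rw [PySem.Set.ofList_eq_foldl]
  have hinner : ∀ (p1 : Int × Int) (e : List (Int × Int)),
      List.foldl PySem.Set.add [] (locs.foldl (fun em p2 =>
        if p1.1 = p2.1 ∧ p1.2 = p2.2 then em
        else
          let dr := p2.1 - p1.1
          let dc := p2.2 - p1.2
          let I := pvInterval size p1.1 p1.2 dr dc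
          let em := if I.1 ≤ -1 ∧ -1 ≤ I.2 then
              em ++ (PySem.List.pyRange (-1) (I.1 - 1) (-1)).map
                (fun t => (p1.1 + t * dr, p1.2 + t * dc)) else em
          if I.1 ≤ 2 ∧ 2 ≤ I.2 then
              em ++ (PySem.List.pyRange 2 (I.2 + 1) 1).map
                (fun t => (p1.1 + t * dr, p1.2 + t * dc)) else em) e) =
      locs.foldl (fun acc p2 =>
        if p1.1 = p2.1 ∧ p1.2 = p2.2 then acc
        else
          let sr := p2.1 - p1.1
          let sc := p2.2 - p1.2
          pvWalkFwd size sr sc (size.toNat + 1) p2.1 p2.2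
            (pvWalkBack size sr sc (size.toNat + 1) p1.1 p1.2 acc))
        (List.foldl PySem.Set.add [] e) := by
    intro p1
    exact pvCouple (List.foldl PySem.Set.add []) _ _
      (fun e p2 => by
        simp only
        rw [pvPairB size p1 p2 e, List.foldl_append, ← pvPairA size p1 p2]) locs
  exact (pvCouple (List.foldl PySem.Set.add []) _ _ (fun e p1 => hinner p1 e) locs []).symm
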